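-- pv_equiv track=rewrite | github.com/unclevito2017/Range-divide | range.py | divide_keyspace
-- ===== SOURCE A (Python) =====
-- def divide_keyspace(start, end, num_ranges):
--     # Convert start and end keyspaces from hexadecimal to integer
--     start_int = int(start, 16)
--     end_int = int(end, 16)
--
--     # Calculate the range size
--     range_size = (end_int - start_int) // num_ranges
--
--     ranges = []
--     current = start_int
--
--     # Divide the keyspace into equal ranges
--     for i in range(num_ranges):
--         # Calculate the end value for the current range
--         range_end = current + range_size - 1
--
--         # Convert the start and end values to hexadecimal strings
--         start_hex = hex(current)[2:]
--         end_hex = hex(range_end)[2:]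
--
--         # Append the range to the list
--         ranges.append(f"{start_hex}:{end_hex}")
--
--         # Update the current value for the next iteration
--         current = range_end + 1
--
--     return ranges
-- ===== SOURCE B (Python) =====
-- def divide_keyspace(start, end, num_ranges):
--     # Divide and conquer: recursively split the block of n ranges into two
--     # halves instead of walking a running cursor; correct because each range i
--     # is exactly [start_int + i*range_size, start_int + (i+1)*range_size - 1].
--     start_int = int(start, 16)
--     end_int = int(end, 16)
--     range_size = (end_int - start_int) // num_ranges
--
--     def fmt(s):
--         return f"{hex(s)[2:]}:{hex(s + range_size - 1)[2:]}"
--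
--     def seg(s0, n):
--         if n <= 0:
--             return []
--         if n == 1:
--             return [fmt(s0)]
--         h = n // 2
--         return seg(s0, h) + seg(s0 + h * range_size, n - h)
--
--     return seg(start_int, num_ranges)
-- ===== Notes on version B (the rewrite author's own statement) =====
-- stated objective: alternative
-- what changed: Replaces A's single forward pass threading a running `current` cursor with a recursive divide-and-conquer that splits the block of n ranges in half and concatenates the two halves, computing each start in closed form from the block offset.
-- outside the precondition, e.g. on divide_keyspace('a', 'ff', 0): A raises ZeroDivisionError, B raises ZeroDivisionError; on divide_keyspace('xyz', 'ff', 2): A raises ValueError, B raises ValueError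
import Mathlib
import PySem

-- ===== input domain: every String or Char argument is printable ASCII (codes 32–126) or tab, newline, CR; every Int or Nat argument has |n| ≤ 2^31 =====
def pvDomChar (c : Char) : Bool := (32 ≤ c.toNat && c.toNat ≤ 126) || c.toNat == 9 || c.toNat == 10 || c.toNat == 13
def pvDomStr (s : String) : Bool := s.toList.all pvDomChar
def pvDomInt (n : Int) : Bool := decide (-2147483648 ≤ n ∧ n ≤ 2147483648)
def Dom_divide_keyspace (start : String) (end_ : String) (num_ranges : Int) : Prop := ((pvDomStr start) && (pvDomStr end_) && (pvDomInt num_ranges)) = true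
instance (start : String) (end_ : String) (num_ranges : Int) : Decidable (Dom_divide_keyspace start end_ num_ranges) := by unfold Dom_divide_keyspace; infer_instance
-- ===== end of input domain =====

-- B replaces A's forward pass with a running cursor by a recursive divide-and-conquer
-- over the block of n ranges (objective: alternative; same number of ranges produced).

-- ===== PORT A =====
-- hex(n)[2:] ported by hand (PySem has no hex): for n ≥ 0 Python gives the lowercase
-- hex digits; for n < 0, hex(n) = "-0x…" so [2:] drops "-0" leaving "x" ++ digits.
-- Exact on all Int (Nat.toDigits 16 produces Python's lowercase digits, '0' for 0).
def pyHex2 (n : Int) : String :=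
  if 0 ≤ n then String.ofList (Nat.toDigits 16 n.toNat)
  else "x" ++ String.ofList (Nat.toDigits 16 (-n).toNat)

def divide_keyspace (start : String) (end_ : String) (num_ranges : Int) : List String :=
  match PySem.Int.ofStrBase? start 16, PySem.Int.ofStrBase? end_ 16 with
  | some start_int, some end_int =>
    -- num_ranges = 0 raises ZeroDivisionError in Python: excluded by Pre_
    let range_size := PySem.Int.floordiv (end_int - start_int) num_ranges
    ((PySem.List.pyRange 0 num_ranges 1).foldl
      (fun (st : List String × Int) _ =>
        let current := st.2
        let range_end := current + range_size - 1
        (st.1 ++ [pyHex2 current ++ ":" ++ pyHex2 range_end], range_end + 1))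
      ([], start_int)).1
  | _, _ => []  -- int(·,16) raised ValueError: excluded by Pre_

-- ===== PORT B =====
-- Source B's inner fmt(s)
def fmtB (range_size : Int) (s : Int) : String :=
  pyHex2 s ++ ":" ++ pyHex2 (s + range_size - 1)

-- Source B's inner seg(s0, n): divide and conquer on the count of ranges
def segB (range_size : Int) (s0 : Int) (n : Int) : List String :=
  if n ≤ 0 then []
  else if n = 1 then [fmtB range_size s0]
  else
    let h := PySem.Int.floordiv n 2
    segB range_size s0 h ++ segB range_size (s0 + h * range_size) (n - h)
termination_by n.toNat
decreasing_by
  · have h2 : (2 : Int) ≤ n := by omega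
    have he : PySem.Int.floordiv n 2 = n / 2 := PySem.Int.floordiv_eq_ediv_of_pos (by omega)
    rw [he]; omega
  · have h2 : (2 : Int) ≤ n := by omega
    have he : PySem.Int.floordiv n 2 = n / 2 := PySem.Int.floordiv_eq_ediv_of_pos (by omega)
    rw [he]; omega

def divide_keyspace_alt (start : String) (end_ : String) (num_ranges : Int) : List String :=
  match PySem.Int.ofStrBase? start 16 with
  | none => []  -- int(·,16) raised ValueError: excluded by Pre_
  | some start_int =>
    match PySem.Int.ofStrBase? end_ 16 with
    | none => []
    | some end_int =>
      let range_size := PySem.Int.floordiv (end_int - start_int) num_ranges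
      segB range_size start_int num_ranges

-- ===== PRECONDITION & SPEC =====
-- Pre_: both strings parse as Python int(s,16) (else ValueError) and num_ranges ≠ 0
-- (else ZeroDivisionError); exactly the inputs where A returns normally.
def Pre_divide_keyspace (start : String) (end_ : String) (num_ranges : Int) : Prop :=
  (PySem.Int.ofStrBase? start 16).isSome ∧ (PySem.Int.ofStrBase? end_ 16).isSome ∧ num_ranges ≠ 0
instance (start : String) (end_ : String) (num_ranges : Int) : Decidable (Pre_divide_keyspace start end_ num_ranges) := by unfold Pre_divide_keyspace; infer_instance
def pvWitness_divide_keyspace : String × String × Int := ("a", "ff", 3)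

def Spec_divide_keyspace (start : String) (end_ : String) (num_ranges : Int) (out : List String) : Prop := out = divide_keyspace_alt start end_ num_ranges
instance (start : String) (end_ : String) (num_ranges : Int) (out : List String) : Decidable (Spec_divide_keyspace start end_ num_ranges out) := by unfold Spec_divide_keyspace; infer_instance

-- ===== CLAIM (what is proved, stated in full; the proofs are below) =====
def Claim_equal_divide_keyspace : Prop := ∀ (start : String) (end_ : String) (num_ranges : Int), Dom_divide_keyspace start end_ num_ranges → Pre_divide_keyspace start end_ num_ranges → Spec_divide_keyspace start end_ num_ranges (divide_keyspace start end_ num_ranges)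

-- ===== LEMMAS AND PROOFS =====

-- A's loop invariant: folding A's step over range(0, m) yields (the m formatted
-- ranges in closed form, start_int + m * range_size).
theorem divide_keyspace_loop (s rs : Int) (m : Nat) :
    ((PySem.List.pyRange 0 m 1).foldl
      (fun (st : List String × Int) _ =>
        (st.1 ++ [pyHex2 st.2 ++ ":" ++ pyHex2 (st.2 + rs - 1)], (st.2 + rs - 1) + 1))
      ([], s))
    = ((PySem.List.pyRange 0 m 1).map (fun i => fmtB rs (s + i * rs)), s + m * rs) := by
  induction m with
  | zero => simp [PySem.List.pyRange_one_eq_nil]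
  | succ k ih =>
    have h : (0 : Int) ≤ (k : Int) := Int.natCast_nonneg k
    have hr : PySem.List.pyRange 0 ((k : Int) + 1) 1
        = PySem.List.pyRange 0 (k : Int) 1 ++ [(k : Int)] :=
      PySem.List.pyRange_one_succ_right h
    push_cast
    rw [hr, List.foldl_append, List.map_append, ih]
    simp only [List.foldl_cons, List.foldl_nil, List.map_cons, List.map_nil, fmtB]
    rw [show s + (k : Int) * rs + rs - 1 + 1 = s + ((k : Int) + 1) * rs by ring]

-- B's divide-and-conquer produces the same m formatted ranges (strong induction
-- on the block size; the split point is m / 2).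
theorem segB_eq (rs : Int) (m : Nat) : ∀ (s0 : Int),
    segB rs s0 (m : Int) = (PySem.List.pyRange 0 (m : Int) 1).map (fun i => fmtB rs (s0 + i * rs)) := by
  induction m using Nat.strong_induction_on with
  | _ m ih =>
    intro s0
    match m with
    | 0 => rw [segB]; simp [PySem.List.pyRange_one_eq_nil]
    | 1 =>
      rw [segB]
      push_cast
      rw [show PySem.List.pyRange (0:Int) 1 1 = [(0:Int)] from rfl]
      norm_num
    | (k + 2) =>
      rw [segB]
      have hm2 : (2 : Int) ≤ ((k + 2 : Nat) : Int) := by push_cast; omega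
      have hfd : PySem.Int.floordiv ((k + 2 : Nat) : Int) 2 = (((k + 2) / 2 : Nat) : Int) := by
        exact_mod_cast PySem.Int.floordiv_natCast (k + 2) 2
      set h : Nat := (k + 2) / 2 with hh
      have hlt : h < k + 2 := by omega
      have hpos : 1 ≤ h := by omega
      have hlt2 : k + 2 - h < k + 2 := by omega
      have hsub : ((k + 2 : Nat) : Int) - (h : Int) = ((k + 2 - h : Nat) : Int) := by
        push_cast [Nat.cast_sub (le_of_lt hlt)]; ring
      rw [if_neg (by push_cast; omega), if_neg (by push_cast; omega), hfd]
      show segB rs s0 (h : Int) ++ segB rs (s0 + (h : Int) * rs) (((k + 2 : Nat) : Int) - (h : Int))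
          = List.map (fun i => fmtB rs (s0 + i * rs)) (PySem.List.pyRange 0 ((k + 2 : Nat) : Int) 1)
      rw [hsub, ih h hlt s0, ih (k + 2 - h) hlt2 (s0 + (h : Int) * rs)]
      have hsplit : PySem.List.pyRange 0 ((k + 2 : Nat) : Int) 1
          = PySem.List.pyRange 0 (h : Int) 1 ++ PySem.List.pyRange (h : Int) ((k + 2 : Nat) : Int) 1 :=
        PySem.List.pyRange_one_append 0 (h : Int) ((k + 2 : Nat) : Int)
          (Int.natCast_nonneg h) (by exact_mod_cast le_of_lt hlt)
      rw [hsplit, List.map_append]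
      congr 1
      rw [PySem.List.pyRange_one (h : Int) ((k + 2 : Nat) : Int),
        PySem.List.pyRange_one 0 ((k + 2 - h : Nat) : Int)]
      simp only [List.map_map]
      have : (((k + 2 : Nat) : Int) - (h : Int)).toNat = k + 2 - h := by omega
      rw [this]
      have : (((k + 2 - h : Nat) : Int) - 0).toNat = k + 2 - h := by omega
      rw [this]
      refine List.map_congr_left (fun x _ => ?_)
      simp only [Function.comp]
      congr 1
      ring

-- ===== VERDICT (by name: the statement is the Claim_ definition above) =====

theorem divide_keyspace_spec : Claim_equal_divide_keyspace := by
  intro start end_ num_ranges _ _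
  unfold Spec_divide_keyspace divide_keyspace divide_keyspace_alt
  cases hs : PySem.Int.ofStrBase? start 16 with
  | none => rfl
  | some s =>
    cases he : PySem.Int.ofStrBase? end_ 16 with
    | none => rfl
    | some e =>
      simp only
      set rs := PySem.Int.floordiv (e - s) num_ranges with hrs
      by_cases hn : num_ranges ≤ 0
      · rw [PySem.List.pyRange_one_eq_nil hn, segB]
        simp [hn]
      · obtain ⟨m, hm⟩ : ∃ m : Nat, num_ranges = (m : Int) :=
          ⟨num_ranges.toNat, (Int.toNat_of_nonneg (by omega)).symm⟩
        subst hm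
        rw [divide_keyspace_loop s rs m, segB_eq rs m s]
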